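-- pv_equiv track=rewrite | github.com/jJup0/LeetCode | Hard/899. Orderly Queue.py | __duval
-- ===== SOURCE A (Python) =====
-- def __duval(s: str) -> str:
--     # duval algorithm, runs in O(n) time, dont really understand it, but here it is
--     n = len(s)
--     s += s
--     i = 0
--     res_idx = -1
--     while (i < n):
--         res_idx = i
--         j = i + 1
--         k = i
--         while (j < n*2 and s[k] <= s[j]):
--             if (s[k] < s[j]):
--                 k = i
--             else:
--                 k += 1
--             j += 1
--
--         # skips over cases like "ab" repitition in "ababababxyz" apparently
--         while (i <= k):
--             i += j - k
--
--     return s[res_idx:res_idx + n]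
-- ===== SOURCE B (Python) =====
-- def __duval(s: str) -> str:
--     # brute force: the lexicographically least rotation is the min over all rotations
--     if not s:
--         return ""
--     return min(s[i:] + s[:i] for i in range(len(s)))
-- ===== Notes on version B (the rewrite author's own statement) =====
-- stated objective: simpler
-- what changed: Replaces Duval's incremental two-pointer scan over the doubled string by a direct brute-force minimum over all n rotations (min(s[i:]+s[:i] for i in range(n)), with an explicit empty-string guard).
import Mathlib
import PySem

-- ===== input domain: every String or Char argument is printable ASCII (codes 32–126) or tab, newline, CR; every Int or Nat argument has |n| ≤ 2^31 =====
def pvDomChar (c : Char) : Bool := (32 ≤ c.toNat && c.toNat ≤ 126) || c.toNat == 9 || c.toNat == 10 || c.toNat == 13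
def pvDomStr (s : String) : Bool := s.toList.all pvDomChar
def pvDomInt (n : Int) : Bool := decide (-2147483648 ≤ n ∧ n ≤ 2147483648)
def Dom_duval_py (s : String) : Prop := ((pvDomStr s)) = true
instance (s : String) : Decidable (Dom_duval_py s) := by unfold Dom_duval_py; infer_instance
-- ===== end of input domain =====

-- B replaces Duval's linear scan by a brute-force minimum over all rotations (simpler, not faster);
-- both return the lexicographically least rotation of s.

-- ===== PORT A =====
-- inner `while (j < n*2 and s[k] <= s[j])` loop of A; s[k]/s[j] are ported as getD
-- (exact: every index Python evaluates is in range on reached states).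
-- The fuel argument only makes the recursion structural; with the fuel supplied
-- below it never runs out on a reached state.
def duvalScan (t : List Char) (N i : Nat) : Nat → Nat → Nat → Nat × Nat
  | 0, j, k => (j, k)
  | fuel + 1, j, k =>
    if j < N ∧ t.getD k ' ' ≤ t.getD j ' ' then
      duvalScan t N i fuel (j + 1) (if t.getD k ' ' < t.getD j ' ' then i else k + 1)
    else (j, k)

-- `while (i <= k): i += j - k` (fuel as above)
def duvalSkip : Nat → Nat → Nat → Nat → Nat
  | 0, i, _, _ => i
  | fuel + 1, i, j, k => if i ≤ k then duvalSkip fuel (i + (j - k)) j k else i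

-- outer `while (i < n)` loop; returns the final res_idx (fuel as above)
def duvalOuter (t : List Char) (n : Nat) : Nat → Nat → Int → Int
  | 0, _, res => res
  | fuel + 1, i, res =>
    if i < n then
      let jk := duvalScan t (n * 2) i (n * 2) (i + 1) i
      duvalOuter t n fuel (duvalSkip (jk.2 + 1) i jk.1 jk.2) (Int.ofNat i)
    else res

-- Port of A (__duval): n = len(s); s += s; loops; return s[res_idx:res_idx+n]
def duval_py (s : String) : String :=
  let n := s.toList.length
  let t := s.toList ++ s.toList
  let res := duvalOuter t n (n + 1) 0 (-1)
  String.ofList (PySem.List.slice t (some res) (some (res + (n : Int))))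

-- ===== PORT B =====
-- Port of B: "" if s is empty, else min(s[i:] + s[:i] for i in range(len(s)))
def duval_py_alt (s : String) : String :=
  let cs := s.toList
  if cs.length = 0 then "" else
  match PySem.List.min? ((PySem.List.pyRange 0 cs.length 1).map
      (fun i => PySem.List.slice cs (some i) none ++ PySem.List.slice cs none (some i)))
      (fun x => x) with
  | some m => String.ofList m
  | none => ""

-- ===== PRECONDITION & SPEC =====
def Spec_duval_py (s : String) (out : String) : Prop := out = duval_py_alt s
instance (s : String) (out : String) : Decidable (Spec_duval_py s out) := by
  unfold Spec_duval_py; infer_instance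

-- ===== CLAIM (what is proved, stated in full; the proofs are below) =====
def Claim_equal_duval_py : Prop := ∀ (s : String), Dom_duval_py s → Spec_duval_py s (duval_py s)

-- ===== LEMMAS AND PROOFS =====

-- ---------- generic lexicographic-order toolkit on List Char ----------

-- "l₁ is smaller than l₂ by a character difference at position m"
def DiffLt (l₁ l₂ : List Char) : Prop :=
  ∃ m, m < l₁.length ∧ m < l₂.length ∧
    (∀ y, y < m → l₁.getD y ' ' = l₂.getD y ' ') ∧ l₁.getD m ' ' < l₂.getD m ' '

theorem diffLt_lex : ∀ (m : Nat) (l₁ l₂ : List Char), m < l₁.length → m < l₂.length →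
    (∀ y, y < m → l₁.getD y ' ' = l₂.getD y ' ') → l₁.getD m ' ' < l₂.getD m ' ' →
    List.Lex (· < ·) l₁ l₂ := by
  intro m
  induction m with
  | zero =>
    intro l₁ l₂ h1 h2 _ hlt
    cases l₁ with
    | nil => simp at h1
    | cons a t₁ =>
      cases l₂ with
      | nil => simp at h2
      | cons b t₂ => exact List.Lex.rel (by simpa using hlt)
  | succ mm ih =>
    intro l₁ l₂ h1 h2 heq hlt
    cases l₁ with
    | nil => simp at h1
    | cons a t₁ =>
      cases l₂ with
      | nil => simp at h2
      | cons b t₂ =>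
        have hab : a = b := by have := heq 0 (by omega); simpa using this
        subst hab
        exact List.Lex.cons (ih t₁ t₂ (by simpa using h1) (by simpa using h2)
          (fun y hy => by have := heq (y + 1) (by omega); simpa using this)
          (by simpa using hlt))

theorem diffLt_lt : ∀ (l₁ l₂ : List Char), DiffLt l₁ l₂ → l₁ < l₂ := by
  intro l₁ l₂ ⟨m, h1, h2, heq, hlt⟩
  exact (List.lt_iff_lex_lt l₁ l₂).mpr (diffLt_lex m l₁ l₂ h1 h2 heq hlt)

theorem diffLt_append (l₁ l₂ ext : List Char) (h : DiffLt l₁ l₂) : DiffLt (l₁ ++ ext) l₂ := by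
  obtain ⟨m, h1, h2, heq, hlt⟩ := h
  refine ⟨m, by simp; omega, h2, fun y hy => ?_, ?_⟩
  · rw [List.getD_append _ _ _ _ (by omega)]; exact heq y hy
  · rw [List.getD_append _ _ _ _ h1]; exact hlt

theorem nil_le' (l : List Char) : ([] : List Char) ≤ l := by
  cases l with
  | nil => exact le_refl _
  | cons a t => exact le_of_lt ((List.lt_iff_lex_lt _ _).mpr List.Lex.nil)

theorem take_le_take (l₁ l₂ : List Char) (m : Nat) (h : l₁ ≤ l₂) : l₁.take m ≤ l₂.take m := by
  rcases lt_or_eq_of_le h with hlt | heq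
  · have hlex := (List.lt_iff_lex_lt _ _).mp hlt
    clear h hlt
    induction hlex generalizing m with
    | nil => simpa using nil_le' _
    | rel hab =>
      cases m with
      | zero => simp
      | succ mm => exact le_of_lt ((List.lt_iff_lex_lt _ _).mpr (by exact List.Lex.rel hab))
    | cons hlex2 ih =>
      cases m with
      | zero => simp
      | succ mm =>
        rcases lt_or_eq_of_le (ih mm) with h2 | h2
        · exact le_of_lt ((List.lt_iff_lex_lt _ _).mpr
            (List.Lex.cons ((List.lt_iff_lex_lt _ _).mp h2)))
        · simp only [List.take_succ_cons]
          rw [h2]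
  · rw [heq]

theorem lt_diff_or_prefix (l₁ l₂ : List Char) (h : l₁ < l₂) : DiffLt l₁ l₂ ∨ l₁ <+: l₂ := by
  have hlex := (List.lt_iff_lex_lt _ _).mp h
  clear h
  induction hlex with
  | nil => right; exact List.nil_prefix
  | rel hab => left; exact ⟨0, by simp, by simp, fun y hy => by omega, by simpa⟩
  | @cons a t₁ t₂ hlex2 ih =>
    rcases ih with ⟨m, h1, h2, heq, hlt⟩ | hpre
    · left
      refine ⟨m + 1, by simpa using h1, by simpa using h2, fun y hy => ?_, by simpa using hlt⟩
      cases y with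
      | zero => simp
      | succ yy => simpa using heq yy (by omega)
    · right; exact List.cons_prefix_cons.mpr ⟨rfl, hpre⟩

theorem getD_drop (t : List Char) (x y : Nat) :
    (t.drop x).getD y ' ' = t.getD (x + y) ' ' := by
  rw [List.getD_eq_getElem?_getD, List.getD_eq_getElem?_getD, List.getElem?_drop]

theorem getD_take_lt (t : List Char) (p y : Nat) (h : y < p) :
    (t.take p).getD y ' ' = t.getD y ' ' := by
  rw [List.getD_eq_getElem?_getD, List.getD_eq_getElem?_getD, List.getElem?_take_of_lt h]

-- ---------- scan invariant ----------

-- invariant of A's inner loop, scanning from i, state (j, k), current period p = j - k: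
-- t[i..j) is p-periodic and its period word t[i..i+p) is a Lyndon word
structure SF (t : List Char) (i j k : Nat) : Prop where
  hik : i ≤ k
  hkj : k < j
  hjN : j ≤ t.length
  per : ∀ m, i ≤ m → m < k → t.getD m ' ' = t.getD (m + (j - k)) ' '
  lyn : ∀ e, 0 < e → e < j - k →
    ((t.drop i).take (j - k)) < (((t.drop i).take (j - k)).drop e)

-- p-periodicity chained: t[i+y] = t[i + y % p] throughout the scanned word
theorem SF.chain {t : List Char} {i j k : Nat} (sf : SF t i j k) :
    ∀ y, y < j - i → t.getD (i + y) ' ' = t.getD (i + y % (j - k)) ' ' := by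
  have hik := sf.hik
  have hkj := sf.hkj
  intro y
  induction y using Nat.strong_induction_on with
  | _ y ih =>
    intro hy
    by_cases hyp : y < j - k
    · rw [Nat.mod_eq_of_lt hyp]
    · have h1 : t.getD (i + (y - (j - k))) ' ' = t.getD (i + (y - (j - k)) + (j - k)) ' ' :=
        sf.per (i + (y - (j - k))) (by omega) (by omega)
      have h2 := ih (y - (j - k)) (by omega) (by omega)
      have e1 : i + y = i + (y - (j - k)) + (j - k) := by omega
      have e2 : (y - (j - k)) % (j - k) = y % (j - k) := by
        conv_rhs => rw [show y = (y - (j - k)) + (j - k) by omega]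
        rw [Nat.add_mod_right]
      rw [e1, ← h1, h2, e2]

-- u Lyndon, 0 < e < p: u differs from its e-shift at a position m̂ < p - e, u smaller
theorem SF.shift {t : List Char} {i j k : Nat} (sf : SF t i j k) :
    ∀ e, 0 < e → e < j - k →
      ∃ mh, mh < (j - k) - e ∧
        (∀ y, y < mh → t.getD (i + y) ' ' = t.getD (i + (e + y)) ' ') ∧
        t.getD (i + mh) ' ' < t.getD (i + (e + mh)) ' ' := by
  intro e he hep
  have hik := sf.hik
  have hkj := sf.hkj
  have hjN := sf.hjN
  have hlt := sf.lyn e he hep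
  have hul : ((t.drop i).take (j - k)).length = j - k := by
    simp only [List.length_take, List.length_drop]
    omega
  have hu : ∀ y, y < j - k → ((t.drop i).take (j - k)).getD y ' ' = t.getD (i + y) ' ' := by
    intro y hy
    rw [getD_take_lt _ _ _ hy, getD_drop]
  rcases lt_diff_or_prefix _ _ hlt with ⟨m, h1, h2, heq, hlt2⟩ | hpre
  · have h2' : m < (j - k) - e := by
      have := h2
      rwa [List.length_drop, hul] at this
    refine ⟨m, h2', fun y hy => ?_, ?_⟩
    · have := heq y hy
      rw [hu y (by omega), getD_drop, hu (e + y) (by omega)] at this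
      exact this
    · have := hlt2
      rw [hu m (by omega), getD_drop, hu (e + m) (by omega)] at this
      exact this
  · exfalso
    have := hpre.length_le
    rw [hul, List.length_drop, hul] at this
    omega

-- t[k] equals the expected periodic character t[i + (j-i) % p]
theorem SF.k_eq {t : List Char} {i j k : Nat} (sf : SF t i j k) :
    t.getD k ' ' = t.getD (i + (j - i) % (j - k)) ' ' := by
  have hik := sf.hik
  have hkj := sf.hkj
  have h3 := sf.chain ((j - i) - (j - k)) (by omega)
  have h4 : i + ((j - i) - (j - k)) = k := by omega
  have h5 : ((j - i) - (j - k)) % (j - k) = (j - i) % (j - k) := by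
    conv_rhs => rw [show j - i = ((j - i) - (j - k)) + (j - k) from by omega]
    rw [Nat.add_mod_right]
  rw [h4, h5] at h3
  exact h3

-- a p-periodic pre-Lyndon word extended by a strictly larger character is Lyndon
theorem lemext {t : List Char} {i j k : Nat} (sf : SF t i j k) (hjt : j < t.length)
    (hb : t.getD (i + (j - i) % (j - k)) ' ' < t.getD j ' ') :
    ∀ e, 0 < e → e < (j + 1) - i →
      (t.drop i).take (j + 1 - i) < ((t.drop i).take (j + 1 - i)).drop e := by
  intro e he hep
  have hik := sf.hik
  have hkj := sf.hkj
  have hjN := sf.hjN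
  have hp : 0 < j - k := by omega
  have hpl : j - k ≤ j - i := by omega
  have hul : ((t.drop i).take (j + 1 - i)).length = j + 1 - i := by
    simp only [List.length_take, List.length_drop]
    omega
  have hu : ∀ y, y < j + 1 - i → ((t.drop i).take (j + 1 - i)).getD y ' ' = t.getD (i + y) ' ' := by
    intro y hy
    rw [getD_take_lt _ _ _ hy, getD_drop]
  have hd : ∀ y, (((t.drop i).take (j + 1 - i)).drop e).getD y ' ' =
      ((t.drop i).take (j + 1 - i)).getD (e + y) ' ' := fun y => getD_drop _ e y
  have hdl : (((t.drop i).take (j + 1 - i)).drop e).length = j + 1 - i - e := by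
    rw [List.length_drop, hul]
  have hch := sf.chain
  have hTl : t.getD (i + (j - i)) ' ' = t.getD j ' ' := by
    congr 1
    omega
  have hmm : ∀ a : Nat, a % (j - k) % (j - k) = a % (j - k) :=
    fun a => Nat.mod_mod_of_dvd a dvd_rfl
  apply diffLt_lt
  by_cases hemod : e % (j - k) = 0
  · -- e is a multiple of the period
    refine ⟨j - i - e, by omega, by rw [hdl]; omega, fun y hy => ?_, ?_⟩
    · rw [hd, hu y (by omega), hu (e + y) (by omega), hch y (by omega), hch (e + y) (by omega)]
      congr 2
      rw [Nat.add_mod, hemod, Nat.zero_add, hmm]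
    · rw [hd, hu (j - i - e) (by omega), hu (e + (j - i - e)) (by omega),
        show e + (j - i - e) = j - i from by omega, hTl,
        hch (j - i - e) (by omega)]
      have h2 : (j - i - e) % (j - k) = (j - i) % (j - k) := by
        conv_rhs => rw [show j - i = (j - i - e) + e from by omega]
        rw [Nat.add_mod, hemod, Nat.add_zero, hmm]
      rw [h2]
      exact hb
  · -- e is not a multiple: use the Lyndon shift difference of u
    have he' : 0 < e % (j - k) := Nat.pos_of_ne_zero hemod
    have hep' : e % (j - k) < j - k := Nat.mod_lt _ hp
    obtain ⟨mh, hmh, hsheq, hshlt⟩ := sf.shift (e % (j - k)) he' hep'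
    have hmod : ∀ y : Nat, y < (j - k) - e % (j - k) →
        (e + y) % (j - k) = e % (j - k) + y := by
      intro y hy
      have h1 : y % (j - k) = y := Nat.mod_eq_of_lt (by omega)
      rw [Nat.add_mod, h1]
      exact Nat.mod_eq_of_lt (by omega)
    by_cases hcase : mh < j - i - e
    · refine ⟨mh, by omega, by rw [hdl]; omega, fun y hy => ?_, ?_⟩
      · rw [hd, hu y (by omega), hu (e + y) (by omega), hch (e + y) (by omega),
          hmod y (by omega)]
        exact hsheq y hy
      · rw [hd, hu mh (by omega), hu (e + mh) (by omega), hch (e + mh) (by omega),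
          hmod mh (by omega)]
        exact hshlt
    · -- the scanned word ends before the difference: the new character decides
      have hg : j - i - e ≤ mh := by omega
      have hgp : j - i - e < (j - k) - e % (j - k) := by omega
      have hkey : e % (j - k) + (j - i - e) = (j - i) % (j - k) := by
        conv_rhs => rw [show j - i = e + (j - i - e) from by omega]
        rw [Nat.add_mod, Nat.mod_eq_of_lt (show j - i - e < j - k from by omega),
          Nat.mod_eq_of_lt (show e % (j - k) + (j - i - e) < j - k from by omega)]
      refine ⟨j - i - e, by omega, by rw [hdl]; omega, fun y hy => ?_, ?_⟩
      · rw [hd, hu y (by omega), hu (e + y) (by omega), hch (e + y) (by omega),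
          hmod y (by omega)]
        exact hsheq y (by omega)
      · rw [hd, hu (j - i - e) (by omega), hu (e + (j - i - e)) (by omega),
          show e + (j - i - e) = j - i from by omega, hTl]
        rcases Nat.lt_or_ge (j - i - e) mh with hlt2 | hge2
        · rw [hsheq (j - i - e) hlt2, hkey]
          exact hb
        · have hgeq : j - i - e = mh := by omega
          rw [hgeq]
          calc t.getD (i + mh) ' ' < t.getD (i + (e % (j - k) + mh)) ' ' := hshlt
          _ = t.getD (i + (j - i) % (j - k)) ' ' := by rw [← hgeq, hkey]
          _ < t.getD j ' ' := hb

-- the scan preserves SF, and on exit j = N (= |t|) or t[j] < t[k]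
theorem scan_post (t : List Char) (N i : Nat) (hN : N = t.length) :
    ∀ f j k, SF t i j k → N ≤ f + j →
      SF t i (duvalScan t N i f j k).1 (duvalScan t N i f j k).2 ∧
      ((duvalScan t N i f j k).1 = N ∨
        t.getD (duvalScan t N i f j k).1 ' ' < t.getD (duvalScan t N i f j k).2 ' ') := by
  intro f
  induction f with
  | zero =>
    intro j k sf hf
    simp only [duvalScan]
    refine ⟨sf, Or.inl ?_⟩
    have := sf.hjN
    omega
  | succ ff ih =>
    intro j k sf hf
    simp only [duvalScan]
    by_cases h : j < N ∧ t.getD k ' ' ≤ t.getD j ' '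
    · rw [if_pos h]
      by_cases hlt : t.getD k ' ' < t.getD j ' '
      · rw [if_pos hlt]
        refine ih (j + 1) i ?_ (by omega)
        have hb : t.getD (i + (j - i) % (j - k)) ' ' < t.getD j ' ' := sf.k_eq ▸ hlt
        exact { hik := le_refl i
                hkj := by have := sf.hik; have := sf.hkj; omega
                hjN := by rw [← hN]; omega
                per := by intro m h1 h2; omega
                lyn := by
                  have hl := lemext sf (by rw [← hN]; exact h.1) hb
                  intro e he hel
                  exact hl e he (by omega) }
      · rw [if_neg hlt]
        refine ih (j + 1) (k + 1) ?_ (by omega)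
        have heq : t.getD k ' ' = t.getD j ' ' := le_antisymm h.2 (not_lt.mp hlt)
        have hpp : j + 1 - (k + 1) = j - k := by omega
        exact { hik := by have := sf.hik; omega
                hkj := by have := sf.hkj; omega
                hjN := by rw [← hN]; omega
                per := by
                  intro m h1 h2
                  rw [hpp]
                  rcases Nat.lt_or_ge m k with h3 | h3
                  · exact sf.per m h1 h3
                  · have hmk : m = k := by omega
                    rw [hmk, show k + (j - k) = j from by have := sf.hkj; omega]
                    exact heq
                lyn := by
                  intro e he hel
                  rw [hpp] at hel ⊢
                  exact sf.lyn e he hel }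
    · rw [if_neg h]
      refine ⟨sf, ?_⟩
      by_cases hj : j < N
      · right
        have h2 : ¬ t.getD k ' ' ≤ t.getD j ' ' := fun hle => h ⟨hj, hle⟩
        exact not_le.mp h2
      · left
        have := sf.hjN
        omega

theorem duvalSkip_exit : ∀ f i j k, k < i → duvalSkip f i j k = i := by
  intro f i j k h
  cases f with
  | zero => rfl
  | succ ff => simp only [duvalSkip]; rw [if_neg (by omega)]

theorem skip_eq : ∀ f i j k, i ≤ k → k < j → k + 1 ≤ f + i →
    duvalSkip f i j k = i + ((j - i) / (j - k)) * (j - k) := by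
  intro f
  induction f with
  | zero =>
    intro i j k h1 h2 h3
    exact absurd h1 (by omega)
  | succ ff ih =>
    intro i j k h1 h2 h3
    simp only [duvalSkip]
    rw [if_pos h1]
    by_cases h4 : i + (j - k) ≤ k
    · rw [ih _ _ _ h4 h2 (by omega)]
      have hd : (j - i) / (j - k) = (j - (i + (j - k))) / (j - k) + 1 := by
        rw [Nat.div_eq_sub_div (by omega) (by omega)]
        congr 2
        omega
      rw [hd, Nat.succ_mul]
      omega
    · rw [duvalSkip_exit _ _ _ _ (by omega)]
      have hd : (j - i) / (j - k) = 1 := by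
        rw [Nat.div_eq_sub_div (by omega) (by omega), Nat.div_eq_of_lt (by omega)]
      rw [hd]
      omega

-- ---------- suffix comparisons derived from the scan exit state ----------
-- (p := j - k, c := (j-i)/p, r := (j-i)%p, "charstop" : t[j] < t[k] with j < |t|)

-- step between consecutive multiple-of-p suffixes: S(i+(b+1)p) < S(i+bp)
theorem mult_step {t : List Char} {i j k : Nat} (sf : SF t i j k)
    (hj2 : j < t.length) (hstop : t.getD j ' ' < t.getD k ' ') :
    ∀ b, b + 1 ≤ (j - i) / (j - k) →
      DiffLt (t.drop (i + (b + 1) * (j - k))) (t.drop (i + b * (j - k))) := by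
  intro b hb
  have hik := sf.hik
  have hkj := sf.hkj
  have hjN := sf.hjN
  have hp : 0 < j - k := by omega
  have hcp : ((j - i) / (j - k)) * (j - k) ≤ j - i := Nat.div_mul_le_self _ _
  have hb1 : (b + 1) * (j - k) ≤ j - i := le_trans (Nat.mul_le_mul_right _ hb) hcp
  have hbp : b * (j - k) + (j - k) = (b + 1) * (j - k) := by ring
  have hch := sf.chain
  refine ⟨(j - i) - (b + 1) * (j - k), ?_, ?_, fun y hy => ?_, ?_⟩
  · rw [List.length_drop]
    omega
  · rw [List.length_drop]
    omega
  · rw [getD_drop, getD_drop,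
      show i + (b + 1) * (j - k) + y = i + ((b + 1) * (j - k) + y) from by omega,
      show i + b * (j - k) + y = i + (b * (j - k) + y) from by omega,
      hch ((b + 1) * (j - k) + y) (by omega), hch (b * (j - k) + y) (by omega),
      mul_comm (b + 1) (j - k), mul_comm b (j - k), Nat.mul_add_mod, Nat.mul_add_mod]
  · rw [getD_drop, getD_drop,
      show i + (b + 1) * (j - k) + ((j - i) - (b + 1) * (j - k)) = j from by omega,
      show i + b * (j - k) + ((j - i) - (b + 1) * (j - k)) = k from by omega]
    exact hstop

theorem mult_chain {t : List Char} {i j k : Nat} (sf : SF t i j k)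
    (hj2 : j < t.length) (hstop : t.getD j ' ' < t.getD k ' ') :
    ∀ a b, b < a → a ≤ (j - i) / (j - k) →
      t.drop (i + a * (j - k)) < t.drop (i + b * (j - k)) := by
  intro a
  induction a with
  | zero => omega
  | succ aa ih =>
    intro b hb hle
    rcases Nat.lt_or_ge b aa with h2 | h2
    · exact lt_trans (diffLt_lt _ _ (mult_step sf hj2 hstop aa hle)) (ih b h2 (by omega))
    · have hba : b = aa := by omega
      rw [hba]
      exact diffLt_lt _ _ (mult_step sf hj2 hstop aa hle)

-- S(i + cp) < S(i + o) for non-multiple offsets o < cp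
theorem nonmult_lt {t : List Char} {i j k : Nat} (sf : SF t i j k)
    (hj2 : j < t.length) (hstop : t.getD j ' ' < t.getD k ' ') :
    ∀ o, 0 < o → o < ((j - i) / (j - k)) * (j - k) → ¬ ((j - k) ∣ o) →
      DiffLt (t.drop (i + ((j - i) / (j - k)) * (j - k))) (t.drop (i + o)) := by
  intro o ho hoCp hdvd
  have hik := sf.hik
  have hkj := sf.hkj
  have hjN := sf.hjN
  have hp : 0 < j - k := by omega
  have hch := sf.chain
  have hcp : ((j - i) / (j - k)) * (j - k) ≤ j - i := Nat.div_mul_le_self _ _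
  have hdm : ((j - i) / (j - k)) * (j - k) + (j - i) % (j - k) = j - i := by
    have h0 := Nat.div_add_mod (j - i) (j - k)
    rw [Nat.mul_comm (j - k)] at h0
    exact h0
  have he' : 0 < o % (j - k) := by
    rcases Nat.eq_zero_or_pos (o % (j - k)) with h0 | h0
    · exact absurd (Nat.dvd_of_mod_eq_zero h0) hdvd
    · exact h0
  have hep' : o % (j - k) < j - k := Nat.mod_lt _ hp
  obtain ⟨mh, hmh, hsheq, hshlt⟩ := sf.shift (o % (j - k)) he' hep'
  have homod : ∀ y : Nat, y < (j - k) - o % (j - k) →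
      (o + y) % (j - k) = o % (j - k) + y := by
    intro y hy
    have h1 : y % (j - k) = y := Nat.mod_eq_of_lt (by omega)
    rw [Nat.add_mod, h1]
    exact Nat.mod_eq_of_lt (by omega)
  have hcmod : ∀ y : Nat, y < j - k →
      (((j - i) / (j - k)) * (j - k) + y) % (j - k) = y := by
    intro y hy
    rw [mul_comm, Nat.mul_add_mod]
    exact Nat.mod_eq_of_lt hy
  by_cases hcase : mh < (j - i) % (j - k)
  · refine ⟨mh, ?_, ?_, fun y hy => ?_, ?_⟩
    · rw [List.length_drop]
      omega
    · rw [List.length_drop]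
      omega
    · rw [getD_drop, getD_drop,
        show i + ((j - i) / (j - k)) * (j - k) + y = i + (((j - i) / (j - k)) * (j - k) + y)
          from by omega,
        show i + o + y = i + (o + y) from by omega,
        hch (((j - i) / (j - k)) * (j - k) + y) (by omega),
        hch (o + y) (by omega),
        hcmod y (by omega), homod y (by omega)]
      exact hsheq y hy
    · rw [getD_drop, getD_drop,
        show i + ((j - i) / (j - k)) * (j - k) + mh = i + (((j - i) / (j - k)) * (j - k) + mh)
          from by omega,
        show i + o + mh = i + (o + mh) from by omega,
        hch (((j - i) / (j - k)) * (j - k) + mh) (by omega),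
        hch (o + mh) (by omega),
        hcmod mh (by omega), homod mh (by omega)]
      exact hshlt
  · refine ⟨(j - i) % (j - k), ?_, ?_, fun y hy => ?_, ?_⟩
    · rw [List.length_drop]
      omega
    · rw [List.length_drop]
      omega
    · rw [getD_drop, getD_drop,
        show i + ((j - i) / (j - k)) * (j - k) + y = i + (((j - i) / (j - k)) * (j - k) + y)
          from by omega,
        show i + o + y = i + (o + y) from by omega,
        hch (((j - i) / (j - k)) * (j - k) + y) (by omega),
        hch (o + y) (by omega),
        hcmod y (by omega), homod y (by omega)]
      exact hsheq y (by omega)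
    · rw [getD_drop, getD_drop,
        show i + ((j - i) / (j - k)) * (j - k) + (j - i) % (j - k) = j from by omega,
        show i + o + (j - i) % (j - k) = i + (o + (j - i) % (j - k)) from by omega,
        hch (o + (j - i) % (j - k)) (by omega),
        homod ((j - i) % (j - k)) (by omega)]
      have hTk : t.getD j ' ' < t.getD (i + (j - i) % (j - k)) ' ' := sf.k_eq ▸ hstop
      rcases Nat.lt_or_ge ((j - i) % (j - k)) mh with h2 | h2
      · rw [← hsheq ((j - i) % (j - k)) h2]
        exact hTk
      · have heq2 : (j - i) % (j - k) = mh := by omega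
        rw [heq2]
        calc t.getD j ' ' < t.getD (i + (j - i) % (j - k)) ' ' := hTk
        _ = t.getD (i + mh) ' ' := by rw [heq2]
        _ < t.getD (i + (o % (j - k) + mh)) ' ' := hshlt

-- ---------- structure of t = w ++ w ----------

-- the suffix at z is the suffix at z + n extended by w
theorem sfx_ext (w : List Char) (z : Nat) (hz : z ≤ w.length) :
    (w ++ w).drop z = ((w ++ w).drop (z + w.length)) ++ w := by
  rw [List.drop_append_of_le_length hz, List.drop_append]
  have h1 : w.drop (z + w.length) = [] := by
    apply List.drop_eq_nil_of_le
    omega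
  have h2 : z + w.length - w.length = z := by omega
  rw [h1, h2]
  simp

-- a DiffLt witness at a suffix v ≥ n maps back to the suffix at v - n
theorem zmap (w : List Char) (x v : Nat) (hv1 : w.length ≤ v)
    (hd : DiffLt ((w ++ w).drop v) ((w ++ w).drop x)) :
    DiffLt ((w ++ w).drop (v - w.length)) ((w ++ w).drop x) := by
  have he : (w ++ w).drop (v - w.length) = ((w ++ w).drop v) ++ w := by
    have := sfx_ext w (v - w.length) (by
      obtain ⟨m, h1, _, _, _⟩ := hd
      simp only [List.length_drop, List.length_append] at h1
      omega)
    rwa [show v - w.length + w.length = v by omega] at this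
  rw [he]
  exact diffLt_append _ _ _ hd

-- ---------- the outer loop's invariant ----------

-- at outer iterate i, the suffix at i is strictly smaller than every earlier suffix
def Sinv (t : List Char) (i : Nat) : Prop := ∀ x, x < i → t.drop i < t.drop x

-- the invariant is maintained across one outer step i ↦ i + cp (when t[j] < t[k])
theorem maintenance {w : List Char} {i j k : Nat} (sf : SF (w ++ w) i j k)
    (hj2 : j < (w ++ w).length) (hstop : (w ++ w).getD j ' ' < (w ++ w).getD k ' ')
    (hsinv : Sinv (w ++ w) i) :
    ∀ x, x < i + ((j - i) / (j - k)) * (j - k) →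
      (w ++ w).drop (i + ((j - i) / (j - k)) * (j - k)) < (w ++ w).drop x := by
  intro x hx
  have hik := sf.hik
  have hkj := sf.hkj
  have hp : 0 < j - k := by omega
  have hcp : ((j - i) / (j - k)) * (j - k) ≤ j - i := Nat.div_mul_le_self _ _
  have hC1 : 1 ≤ (j - i) / (j - k) := (Nat.one_le_div_iff hp).mpr (by omega)
  have hstep0 : (w ++ w).drop (i + ((j - i) / (j - k)) * (j - k)) < (w ++ w).drop i := by
    have h2 := mult_chain sf hj2 hstop ((j - i) / (j - k)) 0 hC1 (le_refl _)
    rwa [Nat.zero_mul, Nat.add_zero] at h2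
  rcases lt_trichotomy x i with h1 | h1 | h1
  · exact lt_trans hstep0 (hsinv x h1)
  · rw [h1]
    exact hstep0
  · by_cases hdvd : (j - k) ∣ (x - i)
    · obtain ⟨a, ha⟩ := hdvd
      have hxa : x = i + a * (j - k) := by rw [Nat.mul_comm] at ha; omega
      have haC : a < (j - i) / (j - k) := by
        apply Nat.lt_of_mul_lt_mul_right (a := j - k)
        omega
      rw [hxa]
      exact mult_chain sf hj2 hstop ((j - i) / (j - k)) a haC (le_refl _)
    · have hd := nonmult_lt sf hj2 hstop (x - i) (by omega) (by omega) hdvd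
      have h2 := diffLt_lt _ _ hd
      rwa [show i + (x - i) = x from by omega] at h2

-- when the scan ran to the end of t, the jump lands at or past n
theorem twoN_ge (n i j k : Nat) (hik : i ≤ k) (hkj : k < j) (hj : j = 2 * n) :
    n ≤ i + ((j - i) / (j - k)) * (j - k) := by
  have hp : 0 < j - k := by omega
  have h1 : (j - k) * ((j - i) / (j - k)) + (j - i) % (j - k) = j - i :=
    Nat.div_add_mod _ _
  have hR : (j - i) % (j - k) < j - k := Nat.mod_lt _ hp
  have hC : 1 ≤ (j - i) / (j - k) := (Nat.one_le_div_iff hp).mpr (by omega)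
  have hPp : j - k ≤ ((j - i) / (j - k)) * (j - k) := by
    calc j - k = 1 * (j - k) := (one_mul _).symm
    _ ≤ ((j - i) / (j - k)) * (j - k) := Nat.mul_le_mul_right _ hC
  have h1' := h1
  rw [mul_comm (j - k)] at h1'
  omega

-- at the final outer iterate, rotation(i) is minimal among all rotations
theorem final_min {w : List Char} {i j k : Nat} (sf : SF (w ++ w) i j k)
    (hstop : j = (w ++ w).length ∨ (w ++ w).getD j ' ' < (w ++ w).getD k ' ')
    (hsinv : Sinv (w ++ w) i) (hin : i < w.length)
    (hge : w.length ≤ i + ((j - i) / (j - k)) * (j - k)) :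
    ∀ q, q < w.length →
      ((w ++ w).drop i).take w.length ≤ ((w ++ w).drop q).take w.length := by
  have hik := sf.hik
  have hkj := sf.hkj
  have hjN := sf.hjN
  have hp : 0 < j - k := by omega
  have htl : (w ++ w).length = 2 * w.length := by
    rw [List.length_append]
    omega
  have hch := sf.chain
  have hcp : ((j - i) / (j - k)) * (j - k) ≤ j - i := Nat.div_mul_le_self _ _
  by_cases hj2 : j = (w ++ w).length
  · -- the scan ran to the end of t: every later start gives an equal or larger rotation
    intro q hq
    rcases lt_trichotomy q i with h1 | h1 | h1
    · exact take_le_take _ _ _ (le_of_lt (hsinv q h1))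
    · rw [h1]
    · have hqi : i < q := h1
      by_cases hdvd : (j - k) ∣ (q - i)
      · -- a period multiple: the two rotations are equal
        apply le_of_eq
        apply List.ext_getElem
        · rw [List.length_take, List.length_take, List.length_drop, List.length_drop]
          omega
        · intro y hy1 hy2
          have hyn : y < w.length := by
            rw [List.length_take, List.length_drop] at hy1
            omega
          rw [← List.getD_eq_getElem _ ' ' hy1, ← List.getD_eq_getElem _ ' ' hy2,
            getD_take_lt _ _ _ hyn, getD_take_lt _ _ _ hyn, getD_drop, getD_drop,
            hch y (by omega),
            show q + y = i + ((q - i) + y) from by omega,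
            hch ((q - i) + y) (by omega)]
          obtain ⟨a, ha⟩ := hdvd
          rw [ha, Nat.mul_add_mod]
      · have he' : 0 < (q - i) % (j - k) := by
          rcases Nat.eq_zero_or_pos ((q - i) % (j - k)) with h0 | h0
          · exact absurd (Nat.dvd_of_mod_eq_zero h0) hdvd
          · exact h0
        have hep' : (q - i) % (j - k) < j - k := Nat.mod_lt _ hp
        obtain ⟨mh, hmh, hsheq, hshlt⟩ := sf.shift ((q - i) % (j - k)) he' hep'
        have homod : ∀ y : Nat, y < (j - k) - (q - i) % (j - k) →
            ((q - i) + y) % (j - k) = (q - i) % (j - k) + y := by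
          intro y hy
          have h2 : y % (j - k) = y := Nat.mod_eq_of_lt (by omega)
          rw [Nat.add_mod, h2]
          exact Nat.mod_eq_of_lt (by omega)
        have hcommon : ∀ y, y ≤ mh → y < w.length →
            ((w ++ w).drop q).getD y ' ' = (w ++ w).getD (i + ((q - i) % (j - k) + y)) ' ' := by
          intro y hy hyn
          rw [getD_drop,
            show q + y = i + ((q - i) + y) from by omega,
            hch ((q - i) + y) (by omega),
            homod y (by omega)]
        have hself : ∀ y, y ≤ mh → y < w.length →
            ((w ++ w).drop i).getD y ' ' = (w ++ w).getD (i + y) ' ' := by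
          intro y hy hyn
          rw [getD_drop]
        by_cases hmn : mh < w.length
        · apply le_of_lt
          apply diffLt_lt
          refine ⟨mh, ?_, ?_, fun y hy => ?_, ?_⟩
          · rw [List.length_take, List.length_drop]
            omega
          · rw [List.length_take, List.length_drop]
            omega
          · rw [getD_take_lt _ _ _ (by omega), getD_take_lt _ _ _ (by omega),
              hself y (by omega) (by omega), hcommon y (by omega) (by omega)]
            exact hsheq y hy
          · rw [getD_take_lt _ _ _ hmn, getD_take_lt _ _ _ hmn,
              hself mh (le_refl _) hmn, hcommon mh (le_refl _) hmn]
            exact hshlt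
        · apply le_of_eq
          apply List.ext_getElem
          · rw [List.length_take, List.length_take, List.length_drop, List.length_drop]
            omega
          · intro y hy1 hy2
            have hyn : y < w.length := by
              rw [List.length_take, List.length_drop] at hy1
              omega
            rw [← List.getD_eq_getElem _ ' ' hy1, ← List.getD_eq_getElem _ ' ' hy2,
              getD_take_lt _ _ _ hyn, getD_take_lt _ _ _ hyn,
              hself y (by omega) hyn, hcommon y (by omega) hyn]
            exact hsheq y (by omega)
  · -- character stop: i is the minimum-suffix start among [0, n)
    have hcs : (w ++ w).getD j ' ' < (w ++ w).getD k ' ' := hstop.resolve_left hj2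
    have hj2' : j < (w ++ w).length := by omega
    obtain ⟨xs, hxsmem, hxsmin⟩ := Finset.exists_min_image (Finset.range w.length)
      (fun x => (w ++ w).drop x) ⟨i, Finset.mem_range.mpr hin⟩
    have hxsn : xs < w.length := Finset.mem_range.mp hxsmem
    have hmin : ∀ q, q < w.length → (w ++ w).drop xs ≤ (w ++ w).drop q :=
      fun q hq => hxsmin q (Finset.mem_range.mpr hq)
    have hxi : xs = i := by
      rcases lt_trichotomy xs i with h1 | h1 | h1
      · exact absurd (hmin i hin) (not_le.mpr (hsinv xs h1))
      · exact h1
      · exfalso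
        have hoCp : xs - i < ((j - i) / (j - k)) * (j - k) := by omega
        by_cases hdvd : (j - k) ∣ (xs - i)
        · obtain ⟨a, ha⟩ := hdvd
          have hxa : xs = i + a * (j - k) := by rw [Nat.mul_comm] at ha; omega
          have haC : a + 1 ≤ (j - i) / (j - k) := by
            have h4 : a < (j - i) / (j - k) := by
              apply Nat.lt_of_mul_lt_mul_right (a := j - k)
              omega
            omega
          have hd := mult_step sf hj2' hcs a haC
          by_cases hvn : i + (a + 1) * (j - k) < w.length
          · exact absurd (hmin _ hvn) (not_le.mpr (by rw [hxa]; exact diffLt_lt _ _ hd))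
          · have hvl : i + (a + 1) * (j - k) ≤ j := by
              have h5 : (a + 1) * (j - k) ≤ ((j - i) / (j - k)) * (j - k) :=
                Nat.mul_le_mul_right _ haC
              omega
            have hz := zmap w (i + a * (j - k)) (i + (a + 1) * (j - k)) (by omega) hd
            have hzn : i + (a + 1) * (j - k) - w.length < w.length := by omega
            exact absurd (hmin _ hzn) (not_le.mpr (by rw [hxa]; exact diffLt_lt _ _ hz))
        · have hd := nonmult_lt sf hj2' hcs (xs - i) (by omega) hoCp hdvd
          rw [show i + (xs - i) = xs from by omega] at hd
          have hvl : i + ((j - i) / (j - k)) * (j - k) ≤ j := by omega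
          have hz := zmap w xs (i + ((j - i) / (j - k)) * (j - k)) (by omega) hd
          have hzn : i + ((j - i) / (j - k)) * (j - k) - w.length < w.length := by omega
          exact absurd (hmin _ hzn) (not_le.mpr (diffLt_lt _ _ hz))
    intro q hq
    rw [← hxi]
    exact take_le_take _ _ _ (hmin q hq)

theorem duvalOuter_exit (t : List Char) (n : Nat) :
    ∀ f i res, ¬ i < n → duvalOuter t n f i res = res := by
  intro f i res h
  cases f with
  | zero => rfl
  | succ ff => simp only [duvalOuter]; rw [if_neg h]

-- the outer loop returns the last iterate, which is a minimal rotation start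
theorem outer_spec (w : List Char) :
    ∀ f i res, w.length ≤ f + i → i < w.length → Sinv (w ++ w) i →
      ∃ rN : Nat, duvalOuter (w ++ w) w.length f i res = (rN : Int) ∧ rN < w.length ∧
        ∀ q, q < w.length →
          ((w ++ w).drop rN).take w.length ≤ ((w ++ w).drop q).take w.length := by
  have hN : w.length * 2 = (w ++ w).length := by
    rw [List.length_append]
    omega
  intro f
  induction f with
  | zero =>
    intro i res hle hin hsinv
    exact absurd hin (by omega)
  | succ ff ih =>
    intro i res hle hin hsinv
    have sf0 : SF (w ++ w) i (i + 1) i :=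
      { hik := le_refl i
        hkj := by omega
        hjN := by rw [← hN]; omega
        per := by intro m h1 h2; omega
        lyn := by intro e he hel; omega }
    obtain ⟨sf', hstop⟩ := scan_post (w ++ w) (w.length * 2) i hN (w.length * 2) (i + 1) i
      sf0 (by omega)
    simp only [duvalOuter]
    rw [if_pos hin]
    set J := (duvalScan (w ++ w) (w.length * 2) i (w.length * 2) (i + 1) i).1 with hJ
    set K := (duvalScan (w ++ w) (w.length * 2) i (w.length * 2) (i + 1) i).2 with hK
    rw [skip_eq (K + 1) i J K sf'.hik sf'.hkj (by omega)]
    have hCp1 : 0 < ((J - i) / (J - K)) * (J - K) := by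
      have h1 : 0 < J - K := by have := sf'.hkj; omega
      have h2 : 1 ≤ (J - i) / (J - K) := (Nat.one_le_div_iff h1).mpr (by have := sf'.hik; omega)
      exact Nat.mul_pos h2 h1
    by_cases hi'n : i + ((J - i) / (J - K)) * (J - K) < w.length
    · by_cases hJeq : J = (w ++ w).length
      · exfalso
        have := twoN_ge w.length i J K sf'.hik sf'.hkj (by rw [hJeq, List.length_append]; omega)
        omega
      · have hcs : (w ++ w).getD J ' ' < (w ++ w).getD K ' ' :=
          hstop.resolve_left (fun h => hJeq (by rw [h]; exact hN))
        have hJlt : J < (w ++ w).length := by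
          have := sf'.hjN
          omega
        have hmaint := maintenance sf' hJlt hcs hsinv
        exact ih _ (Int.ofNat i) (by omega) hi'n hmaint
    · have hfin := final_min sf' (by
          rcases hstop with h | h
          · left; rw [h]; exact hN
          · right; exact h) hsinv hin (by omega)
      rw [duvalOuter_exit _ _ ff _ _ (by omega)]
      exact ⟨i, rfl, hin, hfin⟩

-- rotations of w read off the doubled word
theorem rot_eq_rotation (w : List Char) (q : Nat) (hq : q ≤ w.length) :
    ((w ++ w).drop q).take w.length = w.drop q ++ w.take q := by
  rw [List.drop_append_of_le_length hq, List.take_append]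
  have h1 : (w.drop q).take w.length = w.drop q :=
    List.take_of_length_le (by simp)
  have h2 : w.length - (w.drop q).length = q := by simp; omega
  rw [h1, h2]

-- ===== VERDICT (by name: the statement is the Claim_ definition above) =====
theorem duval_py_spec : Claim_equal_duval_py := by
  intro s _
  unfold Spec_duval_py
  simp only [duval_py, duval_py_alt]
  by_cases hw : s.toList.length = 0
  · have hnil : s.toList = [] := List.eq_nil_of_length_eq_zero hw
    rw [hnil]
    decide
  · have hin : 0 < s.toList.length := Nat.pos_of_ne_zero hw
    obtain ⟨rN, hres, hrn, hmin⟩ :=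
      outer_spec s.toList (s.toList.length + 1) 0 (-1) (by omega) hin
        (fun x hx => absurd hx (Nat.not_lt_zero x))
    rw [if_neg hw, hres, PySem.List.slice_natCast_add]
    set L := (PySem.List.pyRange 0 (s.toList.length : Int) 1).map
      (fun i => PySem.List.slice s.toList (some i) none ++
        PySem.List.slice s.toList none (some i)) with hL
    have hmem : ∀ q : Nat, q < s.toList.length →
        (s.toList.drop q ++ s.toList.take q) ∈ L := by
      intro q hq
      rw [hL]
      apply List.mem_map.mpr
      refine ⟨(q : Int), PySem.List.mem_pyRange_one.mpr ⟨by omega, by omega⟩, ?_⟩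
      rw [PySem.List.slice_from_natCast, PySem.List.slice_to_natCast]
    cases hmq : PySem.List.min? L (fun x => x) with
    | none =>
      exfalso
      have h1 := (PySem.List.min?_eq_none_iff L _).mp hmq
      have h2 := hmem rN hrn
      rw [h1] at h2
      exact absurd h2 (List.not_mem_nil)
    | some m =>
      have hm_mem := PySem.List.min?_mem hmq
      rw [hL] at hm_mem
      obtain ⟨qI, hqI, hfq⟩ := List.mem_map.mp hm_mem
      obtain ⟨hq0, hqn⟩ := PySem.List.mem_pyRange_one.mp hqI
      have hqcast : qI = ((qI.toNat : Nat) : Int) := (Int.toNat_of_nonneg hq0).symm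
      rw [hqcast, PySem.List.slice_from_natCast, PySem.List.slice_to_natCast] at hfq
      have hqn' : qI.toNat < s.toList.length := by omega
      have hub : (s.toList.drop rN ++ s.toList.take rN) ≤ m := by
        rw [← hfq, ← rot_eq_rotation _ _ (le_of_lt hrn), ← rot_eq_rotation _ _ (le_of_lt hqn')]
        exact hmin qI.toNat hqn'
      have hlb : m ≤ (s.toList.drop rN ++ s.toList.take rN) := by
        have hD : (fun (a b : List Char) => a.decidableLT b) =
            (LinearOrder.toDecidableLT (α := List Char)) := Subsingleton.elim _ _
        have hmq2 : @PySem.List.min? (List Char) (List Char) LinearOrder.toPartialOrder.toLT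
            LinearOrder.toDecidableLT L (fun x => x) = some m := by
          rw [← hD]
          exact hmq
        have h3 := PySem.List.min?_isMin hmq2 (s.toList.drop rN ++ s.toList.take rN)
          (hmem rN hrn)
        simpa using h3
      have hmeq : m = s.toList.drop rN ++ s.toList.take rN := le_antisymm hlb hub
      rw [hmeq, rot_eq_rotation _ _ (le_of_lt hrn)]
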